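-- pv_equiv track=rewrite | github.com/chaolabcanada/ubteacher-pathology | ubteacher/utils/train2_utils.py | flip_dict_and_filter
-- ===== SOURCE A (Python) =====
-- from typing import Dict, Tuple, List, Set, Iterator
--
-- def flip_dict_and_filter(d: Dict, c: List) -> Dict:
--     inverse = {}
--     for k,v in d.items():
--         for x in v:
--             if not x in inverse:
--                     inverse.setdefault(x, []).append(k)
--     #flatten values
--     inverse = {k: v[0] for k, v in inverse.items()}
--     #filter values for only those in c
--     inverse = {k: v for k, v in inverse.items() if k in c}
--     return inverse
-- ===== SOURCE B (Python) =====
-- def flip_dict_and_filter(d, c):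
--     # Build the answer back-to-front: walk the items in reverse, make each item's own
--     # filtered mapping, and splice the suffix result behind it (head entries win).
--     cset = set(c)
--     acc = {}
--     for k, v in reversed(list(d.items())):
--         head = {x: k for x in v if x in cset}
--         for x, kk in acc.items():
--             if x not in head:
--                 head[x] = kk
--         acc = head
--     return acc
-- ===== Notes on version B (the rewrite author's own statement) =====
-- stated objective: alternative
-- what changed: Instead of A's three staged passes (full inverse of key-lists, flatten, filter), B builds the answer back-to-front: it walks the items in reverse keeping the suffix's result, forms each item's own filtered mapping by a dict comprehension, and splices the suffix result behind it with head entries winning; there is no first-wins membership-insert pass at all.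
import Mathlib
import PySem

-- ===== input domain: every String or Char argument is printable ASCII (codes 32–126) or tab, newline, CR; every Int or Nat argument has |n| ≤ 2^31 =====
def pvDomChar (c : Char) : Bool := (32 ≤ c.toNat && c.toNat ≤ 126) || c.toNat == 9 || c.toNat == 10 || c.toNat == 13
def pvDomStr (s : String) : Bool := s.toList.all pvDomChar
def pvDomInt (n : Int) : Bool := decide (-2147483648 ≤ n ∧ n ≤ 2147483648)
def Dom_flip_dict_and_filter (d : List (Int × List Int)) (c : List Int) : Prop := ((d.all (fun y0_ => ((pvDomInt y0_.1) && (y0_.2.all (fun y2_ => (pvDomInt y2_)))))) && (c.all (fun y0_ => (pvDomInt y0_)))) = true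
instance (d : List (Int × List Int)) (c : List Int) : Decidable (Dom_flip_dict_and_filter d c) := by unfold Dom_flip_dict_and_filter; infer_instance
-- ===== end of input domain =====

-- B replaces A's three staged passes by a back-to-front construction (reverse walk, per-item
-- filtered mapping, splice the suffix result behind it); return values proved equal below.

-- ===== PORT A =====
def flip_dict_and_filter (d : List (Int × List Int)) (c : List Int) : List (Int × Int) :=
  -- inverse = {}; for k,v in d.items(): for x in v: if not x in inverse: inverse.setdefault(x, []).append(k)
  -- (setdefault(x, []).append(k) sets inverse[x] = inverse.get(x, []) + [k]; ported as exactly that insert)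
  let inverse : PySem.Dict Int (List Int) :=
    d.foldl (fun inv kv =>
      kv.2.foldl (fun inv x =>
        if inv.contains x = false then inv.insert x (inv.getD x [] ++ [kv.1]) else inv) inv)
      PySem.Dict.empty
  -- inverse = {k: v[0] for k, v in inverse.items()}  (every v here is nonempty, so v[0] = v.headD 0 exactly)
  let inverse2 : PySem.Dict Int Int :=
    inverse.items.foldl (fun acc kv => acc.insert kv.1 (kv.2.headD 0)) PySem.Dict.empty
  -- inverse = {k: v for k, v in inverse.items() if k in c}
  let inverse3 : PySem.Dict Int Int :=
    inverse2.items.foldl (fun acc kv => if kv.1 ∈ c then acc.insert kv.1 kv.2 else acc) PySem.Dict.empty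
  inverse3.items

-- ===== PORT B =====
def flip_dict_and_filter_alt (d : List (Int × List Int)) (c : List Int) : List (Int × Int) :=
  -- cset = set(c); acc = {}
  -- for k, v in reversed(list(d.items())):
  --     head = {x: k for x in v if x in cset}
  --     for x, kk in acc.items():
  --         if x not in head: head[x] = kk
  --     acc = head
  -- return acc
  let cset : PySem.Set Int := PySem.Set.ofList c
  let acc : PySem.Dict Int Int :=
    d.reverse.foldl (fun acc kv =>
      let head : PySem.Dict Int Int :=
        kv.2.foldl (fun h x => if x ∈ cset then h.insert x kv.1 else h) PySem.Dict.empty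
      acc.items.foldl (fun h p => if h.contains p.1 = false then h.insert p.1 p.2 else h) head)
      PySem.Dict.empty
  acc.items

-- ===== PRECONDITION & SPEC =====
def Spec_flip_dict_and_filter (d : List (Int × List Int)) (c : List Int) (out : List (Int × Int)) : Prop := out = flip_dict_and_filter_alt d c
instance (d : List (Int × List Int)) (c : List Int) (out : List (Int × Int)) : Decidable (Spec_flip_dict_and_filter d c out) := by unfold Spec_flip_dict_and_filter; infer_instance

-- ===== CLAIM (what is proved, stated in full; the proofs are below) =====
def Claim_equal_flip_dict_and_filter : Prop := ∀ (d : List (Int × List Int)) (c : List Int), Dom_flip_dict_and_filter d c → Spec_flip_dict_and_filter d c (flip_dict_and_filter d c)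

-- ===== LEMMAS AND PROOFS =====

-- Common specification: first-wins key dedup of a pair list, against a list of already-seen keys.
def pvDD (seen : List Int) : List (Int × Int) → List (Int × Int)
  | [] => []
  | p :: ps => if p.1 ∈ seen then pvDD seen ps else p :: pvDD (p.1 :: seen) ps

-- The c-filtered flattened pair sequence of d (x paired with its key, in traversal order).
def pvPairs (c : List Int) (d : List (Int × List Int)) : List (Int × Int) :=
  d.flatMap (fun kv => (kv.2.filter (fun x => decide (x ∈ c))).map (fun x => (x, kv.1)))

lemma pvDD_congr_seen (ps : List (Int × Int)) : ∀ (s t : List Int), (∀ a, a ∈ s ↔ a ∈ t) →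
    pvDD s ps = pvDD t ps := by
  induction ps with
  | nil => intro s t _; rfl
  | cons p ps ih =>
    intro s t hst
    simp only [pvDD]
    by_cases hp : p.1 ∈ s
    · rw [if_pos hp, if_pos ((hst p.1).1 hp)]; exact ih s t hst
    · rw [if_neg hp, if_neg (fun h => hp ((hst p.1).2 h))]
      exact congrArg (p :: ·) (ih _ _ (by intro a; simp [hst a]))

lemma pvDD_append (P : List (Int × Int)) : ∀ (s : List Int) (Q : List (Int × Int)),
    pvDD s (P ++ Q) = pvDD s P ++ pvDD (s ++ (pvDD s P).map (·.1)) Q := by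
  induction P with
  | nil => intro s Q; simp [pvDD]
  | cons p P ih =>
    intro s Q
    by_cases hp : p.1 ∈ s
    · simp only [List.cons_append, pvDD, if_pos hp]
      exact ih s Q
    · simp only [List.cons_append, pvDD, if_neg hp, List.map_cons]
      rw [ih]
      simp only [List.cons_append]
      refine congrArg (p :: ·) (congrArg _ ?_)
      exact pvDD_congr_seen Q _ _ (by intro a; simp; tauto)

lemma pvDD_dd (ps : List (Int × Int)) : ∀ (s t : List Int),
    pvDD s (pvDD t ps) = pvDD (s ++ t) ps := by
  induction ps with
  | nil => intro s t; rfl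
  | cons p ps ih =>
    intro s t
    simp only [pvDD]
    by_cases ht : p.1 ∈ t
    · rw [if_pos ht, if_pos (by simp [ht]), ih]
    · by_cases hs : p.1 ∈ s
      · rw [if_neg ht, if_pos (by simp [hs])]
        simp only [pvDD, if_pos hs]
        rw [ih]
        exact pvDD_congr_seen ps _ _ (by intro a; simp; aesop)
      · rw [if_neg ht, if_neg (by simp [hs, ht])]
        simp only [pvDD, if_neg hs]
        rw [ih]
        exact congrArg (p :: ·) (pvDD_congr_seen ps _ _ (by intro a; simp; tauto))

-- Conditional first-wins insertion of a pair list into a dict appends the dedup'd fresh part.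
lemma pv_cond_insert_pairs (ps : List (Int × Int)) : ∀ (h : PySem.Dict Int Int), h.keys.Nodup →
    ((ps.foldl (fun h p => if h.contains p.1 = false then h.insert p.1 p.2 else h) h).items
        = h.items ++ pvDD h.keys ps
      ∧ (ps.foldl (fun h p => if h.contains p.1 = false then h.insert p.1 p.2 else h) h).keys.Nodup) := by
  induction ps with
  | nil => intro h _; simp [pvDD, *]
  | cons p ps ih =>
    intro h hnd
    simp only [List.foldl_cons, pvDD]
    by_cases hc : h.contains p.1 = false
    · have hmem : p.1 ∉ h.keys := fun hm =>
        by simp [(PySem.Dict.contains_iff_mem_keys h p.1).2 hm] at hc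
      rw [if_pos hc, if_neg hmem]
      have hkeys : (h.insert p.1 p.2).keys = h.keys ++ [p.1] :=
        PySem.Dict.keys_insert_of_not_contains _ _ hc
      have hnd' : (h.insert p.1 p.2).keys.Nodup := by
        rw [hkeys]; simpa [List.nodup_append] using ⟨hnd, fun a ha he => hmem (he ▸ ha)⟩
      obtain ⟨h1, h2⟩ := ih _ hnd'
      refine ⟨?_, h2⟩
      rw [h1, PySem.Dict.items_insert_of_not_contains _ _ hc, hkeys]
      rw [pvDD_congr_seen ps (p.1 :: h.keys) (h.keys ++ [p.1]) (by intro a; simp; tauto)]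
      simp
    · have hc' : h.contains p.1 = true := by revert hc; cases h.contains p.1 <;> simp
      rw [if_neg hc, if_pos ((PySem.Dict.contains_iff_mem_keys h p.1).1 hc')]
      exact ih h hnd

-- The dict comprehension {x: k for x in v if x in c}: items are the dedup'd filtered pairs.
lemma pv_head_items (k : Int) (v : List Int) (c : List Int) :
    ∀ (h : PySem.Dict Int Int), (∀ p ∈ h.items, p.2 = k) → h.keys.Nodup →
    ((v.foldl (fun h x => if x ∈ c then h.insert x k else h) h).items
        = h.items ++ pvDD h.keys ((v.filter (fun x => decide (x ∈ c))).map (fun x => (x, k)))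
      ∧ (∀ p ∈ (v.foldl (fun h x => if x ∈ c then h.insert x k else h) h).items, p.2 = k)
      ∧ (v.foldl (fun h x => if x ∈ c then h.insert x k else h) h).keys.Nodup) := by
  induction v with
  | nil => intro h hv hnd; exact ⟨by simp [pvDD], hv, hnd⟩
  | cons x v ih =>
    intro h hv hnd
    simp only [List.foldl_cons, List.filter_cons]
    by_cases hxc : x ∈ c
    · rw [if_pos hxc, if_pos (by simpa using hxc)]
      simp only [List.map_cons, pvDD]
      by_cases hcon : h.contains x = false
      · have hmem : x ∉ h.keys := fun hm =>
          by simp [(PySem.Dict.contains_iff_mem_keys h x).2 hm] at hcon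
        rw [if_neg hmem]
        have hitems : (h.insert x k).items = h.items ++ [(x, k)] :=
          PySem.Dict.items_insert_of_not_contains _ _ hcon
        have hkeys : (h.insert x k).keys = h.keys ++ [x] :=
          PySem.Dict.keys_insert_of_not_contains _ _ hcon
        have hnd' : (h.insert x k).keys.Nodup := by
          rw [hkeys]; simpa [List.nodup_append] using ⟨hnd, fun a ha he => hmem (he ▸ ha)⟩
        have hv' : ∀ p ∈ (h.insert x k).items, p.2 = k := by
          rw [hitems]; intro p hp
          rcases List.mem_append.1 hp with hp | hp
          · exact hv p hp
          · simp at hp; simp [hp]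
        obtain ⟨h1, h2, h3⟩ := ih _ hv' hnd'
        refine ⟨?_, h2, h3⟩
        rw [h1, hitems, hkeys]
        rw [pvDD_congr_seen _ (x :: h.keys) (h.keys ++ [x]) (by intro a; simp; tauto)]
        simp
      · have hcon' : h.contains x = true := by revert hcon; cases h.contains x <;> simp
        have hmem : x ∈ h.keys := (PySem.Dict.contains_iff_mem_keys h x).1 hcon'
        rw [if_pos hmem]
        -- overwrite of an existing key with the same stored value is the identity on items
        have hid : (h.insert x k).items = h.items := by
          rw [PySem.Dict.items_insert_of_contains _ _ hcon']
          refine (List.map_congr_left ?_).trans (List.map_id _)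
          intro p hp
          by_cases hpx : p.1 == x
          · have : p = (x, k) := by
              have h2 := hv p hp
              have h1 : p.1 = x := by simpa using hpx
              exact Prod.ext h1 h2
            simp [this]
          · simp [hpx]
        have hv2 : ∀ p ∈ (h.insert x k).items, p.2 = k := by rw [hid]; exact hv
        have hnd2 : (h.insert x k).keys.Nodup := by
          unfold PySem.Dict.keys; rw [hid]; exact hnd
        obtain ⟨h1, h2, h3⟩ := ih _ hv2 hnd2
        refine ⟨?_, h2, h3⟩
        rw [h1, hid]
        congr 1
        unfold PySem.Dict.keys; rw [hid]
    · rw [if_neg hxc, if_neg (by simpa using hxc)]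
      exact ih h hv hnd

-- A's fused forward pass (proof-side helper: first-wins conditional insert over d).
def pvFused (d : List (Int × List Int)) (c : List Int) : PySem.Dict Int Int :=
  d.foldl (fun res kv =>
    kv.2.foldl (fun res x =>
      if x ∈ c ∧ res.contains x = false then res.insert x kv.1 else res) res)
    PySem.Dict.empty

-- A's inner loop is the conditional pair insertion over the filtered mapped value list.
lemma pv_inner_eq_pairs (k : Int) (v : List Int) (c : List Int) :
    ∀ (res : PySem.Dict Int Int),
    v.foldl (fun res x => if x ∈ c ∧ res.contains x = false then res.insert x k else res) res
      = ((v.filter (fun x => decide (x ∈ c))).map (fun x => (x, k))).foldl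
          (fun h p => if h.contains p.1 = false then h.insert p.1 p.2 else h) res := by
  induction v with
  | nil => intro res; rfl
  | cons x v ih =>
    intro res
    by_cases hxc : x ∈ c
    · have hd : decide (x ∈ c) = true := by simpa using hxc
      simp only [List.foldl_cons, List.filter_cons, hd, if_true, List.map_cons]
      by_cases hcon : res.contains x = false
      · rw [if_pos ⟨hxc, hcon⟩, if_pos hcon]; exact ih _
      · rw [if_neg (fun hh => hcon hh.2), if_neg hcon]; exact ih _
    · have hd : decide (x ∈ c) = false := by simpa using hxc
      simp only [List.foldl_cons, List.filter_cons, hd, Bool.false_eq_true, if_false]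
      rw [if_neg (fun hh => hxc hh.1)]
      exact ih _

-- The fused forward pass computes the first-wins dedup of the flattened filtered pairs.
lemma pv_fused_items (c : List Int) (d : List (Int × List Int)) :
    ∀ (res : PySem.Dict Int Int), res.keys.Nodup →
    ((d.foldl (fun res kv =>
        kv.2.foldl (fun res x =>
          if x ∈ c ∧ res.contains x = false then res.insert x kv.1 else res) res) res).items
        = res.items ++ pvDD res.keys (pvPairs c d)
      ∧ (d.foldl (fun res kv =>
          kv.2.foldl (fun res x =>
            if x ∈ c ∧ res.contains x = false then res.insert x kv.1 else res) res) res).keys.Nodup) := by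
  induction d with
  | nil => intro res hnd; simp [pvPairs, pvDD, hnd]
  | cons kv d ih =>
    intro res hnd
    simp only [List.foldl_cons]
    rw [pv_inner_eq_pairs]
    obtain ⟨h1, h2⟩ := pv_cond_insert_pairs ((kv.2.filter (fun x => decide (x ∈ c))).map (fun x => (x, kv.1))) res hnd
    obtain ⟨h3, h4⟩ := ih _ h2
    refine ⟨?_, h4⟩
    rw [h3, h1]
    have hkeys : (((kv.2.filter (fun x => decide (x ∈ c))).map (fun x => (x, kv.1))).foldl
        (fun h p => if h.contains p.1 = false then h.insert p.1 p.2 else h) res).keys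
        = res.keys ++ (pvDD res.keys ((kv.2.filter (fun x => decide (x ∈ c))).map (fun x => (x, kv.1)))).map (·.1) := by
      simp only [PySem.Dict.keys]; rw [h1]; simp [PySem.Dict.keys]
    rw [hkeys]
    have : pvPairs c (kv :: d)
        = (kv.2.filter (fun x => decide (x ∈ c))).map (fun x => (x, kv.1)) ++ pvPairs c d := by
      simp [pvPairs]
    rw [this, pvDD_append]
    simp

-- B's backward pass as a foldr (B's reversed loop, via List.foldl_reverse).
def pvAltFold (c : List Int) (d : List (Int × List Int)) : PySem.Dict Int Int :=
  d.foldr (fun kv acc =>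
    acc.items.foldl (fun h p => if h.contains p.1 = false then h.insert p.1 p.2 else h)
      (kv.2.foldl (fun h x => if x ∈ c then h.insert x kv.1 else h) PySem.Dict.empty))
    PySem.Dict.empty

-- B's backward merge pass also computes the first-wins dedup of the flattened filtered pairs.
lemma pv_alt_items (c : List Int) (d : List (Int × List Int)) :
    (pvAltFold c d).items = pvDD [] (pvPairs c d) ∧ (pvAltFold c d).keys.Nodup := by
  induction d with
  | nil => simp [pvAltFold, pvPairs, pvDD, PySem.Dict.empty, PySem.Dict.keys]
  | cons kv d ih =>
    obtain ⟨ih1, ih2⟩ := ih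
    obtain ⟨hh1, _, hh3⟩ := pv_head_items kv.1 kv.2 c PySem.Dict.empty
      (by simp [PySem.Dict.empty]) (by simp [PySem.Dict.keys, PySem.Dict.empty])
    set head := kv.2.foldl (fun h x => if x ∈ c then h.insert x kv.1 else h) PySem.Dict.empty with hhead
    have hstep : pvAltFold c (kv :: d)
        = (pvAltFold c d).items.foldl (fun h p => if h.contains p.1 = false then h.insert p.1 p.2 else h) head := rfl
    rw [hstep]
    have hh1' : head.items = pvDD [] ((kv.2.filter (fun x => decide (x ∈ c))).map (fun x => (x, kv.1))) := by
      rw [hh1]; simp [PySem.Dict.empty, PySem.Dict.keys]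
    obtain ⟨hm1, hm2⟩ := pv_cond_insert_pairs (pvAltFold c d).items head hh3
    refine ⟨?_, hm2⟩
    rw [hm1, ih1, hh1']
    have hpairs : pvPairs c (kv :: d)
        = (kv.2.filter (fun x => decide (x ∈ c))).map (fun x => (x, kv.1)) ++ pvPairs c d := by
      simp [pvPairs]
    rw [hpairs, pvDD_append]
    congr 1
    rw [pvDD_dd]
    refine pvDD_congr_seen _ _ _ ?_
    intro a
    have hk : head.keys = (pvDD [] ((kv.2.filter (fun x => decide (x ∈ c))).map (fun x => (x, kv.1)))).map (·.1) := by
      simp only [PySem.Dict.keys]; rw [hh1']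
    rw [hk]; simp

-- ===== A: the three staged passes equal the fused forward pass =====

-- The filtered-flattened view of A's inverse-so-far equals the fused result-so-far.
def pvCorr (c : List Int) (inv : PySem.Dict Int (List Int)) (res : PySem.Dict Int Int) : Prop :=
  res.items = (inv.items.filter (fun kv => decide (kv.1 ∈ c))).map (fun kv => (kv.1, kv.2.headD 0))

lemma pvCorr_contains (c : List Int) (inv : PySem.Dict Int (List Int)) (res : PySem.Dict Int Int)
    (h : pvCorr c inv res) (x : Int) :
    res.contains x = true ↔ (inv.contains x = true ∧ x ∈ c) := by
  rw [PySem.Dict.contains_iff_mem_keys, PySem.Dict.contains_iff_mem_keys]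
  unfold PySem.Dict.keys
  rw [h]
  simp only [List.map_map, List.mem_map, List.mem_filter, Function.comp, decide_eq_true_eq]
  constructor
  · rintro ⟨kv, ⟨hm, hc⟩, rfl⟩
    exact ⟨⟨kv, hm, rfl⟩, hc⟩
  · rintro ⟨⟨kv, hm, rfl⟩, hc⟩
    exact ⟨kv, ⟨hm, hc⟩, rfl⟩

-- Inner loop (one value list v, key k): stage-1 step vs fused step.
lemma pv_inner (c : List Int) (k : Int) (v : List Int) :
    ∀ (inv : PySem.Dict Int (List Int)) (res : PySem.Dict Int Int),
    pvCorr c inv res → inv.keys.Nodup →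
    pvCorr c
      (v.foldl (fun inv x =>
        if inv.contains x = false then inv.insert x (inv.getD x [] ++ [k]) else inv) inv)
      (v.foldl (fun res x =>
        if x ∈ c ∧ res.contains x = false then res.insert x k else res) res)
    ∧ (v.foldl (fun inv x =>
        if inv.contains x = false then inv.insert x (inv.getD x [] ++ [k]) else inv) inv).keys.Nodup := by
  induction v with
  | nil => intro inv res h hnd; exact ⟨h, hnd⟩
  | cons x v ih =>
    intro inv res h hnd
    simp only [List.foldl_cons]
    by_cases hxi0 : inv.contains x = false
    case neg =>
      have hxi : inv.contains x = true := by revert hxi0; cases inv.contains x <;> simp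
      have hres : ¬ (x ∈ c ∧ res.contains x = false) := by
        rintro ⟨hc, hrc⟩
        have := (pvCorr_contains c inv res h x).2 ⟨hxi, hc⟩
        simp [this] at hrc
      rw [if_neg (by simp [hxi0]), if_neg hres]
      exact ih inv res h hnd
    case pos =>
      have hxk : x ∉ inv.keys := fun hm =>
        by simp [(PySem.Dict.contains_iff_mem_keys inv x).2 hm] at hxi0
      have hitems : (inv.insert x (inv.getD x [] ++ [k])).items = inv.items ++ [(x, [k])] := by
        rw [PySem.Dict.getD_of_not_contains _ _ hxi0,
            PySem.Dict.items_insert_of_not_contains _ _ hxi0]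
        simp
      have hnd' : (inv.insert x (inv.getD x [] ++ [k])).keys.Nodup := by
        rw [PySem.Dict.keys_insert_of_not_contains _ _ hxi0]
        simpa [List.nodup_append] using ⟨hnd, fun a ha he => hxk (he ▸ ha)⟩
      rw [if_pos hxi0]
      by_cases hc : x ∈ c
      · have hrc : res.contains x = false := by
          cases hr : res.contains x with
          | false => rfl
          | true => exact absurd ((pvCorr_contains c inv res h x).1 hr).1 (by simp [hxi0])
        rw [if_pos ⟨hc, hrc⟩]
        refine ih _ _ ?_ hnd'
        unfold pvCorr at h ⊢
        rw [PySem.Dict.items_insert_of_not_contains _ _ hrc, hitems]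
        simp [List.filter_append, List.map_append, hc, h]
      · rw [if_neg (by simp [hc])]
        refine ih _ _ ?_ hnd'
        unfold pvCorr at h ⊢
        rw [hitems]
        simp [List.filter_append, hc, h]

-- Outer loop over d: stage 1 vs the fused pass.
lemma pv_outer (c : List Int) (d : List (Int × List Int)) :
    ∀ (inv : PySem.Dict Int (List Int)) (res : PySem.Dict Int Int),
    pvCorr c inv res → inv.keys.Nodup →
    pvCorr c
      (d.foldl (fun inv kv =>
        kv.2.foldl (fun inv x =>
          if inv.contains x = false then inv.insert x (inv.getD x [] ++ [kv.1]) else inv) inv) inv)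
      (d.foldl (fun res kv =>
        kv.2.foldl (fun res x =>
          if x ∈ c ∧ res.contains x = false then res.insert x kv.1 else res) res) res)
    ∧ (d.foldl (fun inv kv =>
        kv.2.foldl (fun inv x =>
          if inv.contains x = false then inv.insert x (inv.getD x [] ++ [kv.1]) else inv) inv) inv).keys.Nodup := by
  induction d with
  | nil => intro inv res h hnd; exact ⟨h, hnd⟩
  | cons kv d ih =>
    intro inv res h hnd
    simp only [List.foldl_cons]
    obtain ⟨h', hnd'⟩ := pv_inner c kv.1 kv.2 inv res h hnd
    exact ih _ _ h' hnd'

-- Stage 3: conditional insert over pairs with distinct keys fresh w.r.t. acc is filter-append.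
lemma pv_stage3 (c : List Int) :
    ∀ (l : List (Int × Int)) (acc : PySem.Dict Int Int),
    (∀ kv ∈ l, acc.contains kv.1 = false) → (l.map Prod.fst).Nodup →
    (l.foldl (fun acc kv => if kv.1 ∈ c then acc.insert kv.1 kv.2 else acc) acc).items
      = acc.items ++ l.filter (fun kv => decide (kv.1 ∈ c)) := by
  intro l
  induction l with
  | nil => intro acc _ _; simp
  | cons kv l ih =>
    intro acc hfresh hnd
    have hkv : acc.contains kv.1 = false := hfresh kv (by simp)
    simp only [List.foldl_cons, List.map_cons, List.nodup_cons] at *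
    by_cases hc : kv.1 ∈ c
    · rw [if_pos hc, ih _ ?_ hnd.2]
      · rw [PySem.Dict.items_insert_of_not_contains _ _ hkv]
        simp [hc]
      · intro p hp
        rw [PySem.Dict.contains_insert]
        have hne : p.1 ≠ kv.1 := fun he => hnd.1 (he ▸ List.mem_map_of_mem hp)
        simp [hne, hfresh p (List.mem_cons_of_mem _ hp)]
    · rw [if_neg hc, ih _ (fun p hp => hfresh p (List.mem_cons_of_mem _ hp)) hnd.2]
      simp [hc]

-- A's staged result is the fused forward pass's items.
lemma pv_A_eq_fused (d : List (Int × List Int)) (c : List Int) :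
    flip_dict_and_filter d c = (pvFused d c).items := by
  unfold flip_dict_and_filter pvFused
  simp only []
  obtain ⟨hcorr, hnd⟩ := pv_outer c d PySem.Dict.empty PySem.Dict.empty
    (by simp [pvCorr, PySem.Dict.empty]) (by simp [PySem.Dict.keys, PySem.Dict.empty])
  set inv := d.foldl (fun inv kv =>
      kv.2.foldl (fun inv x =>
        if inv.contains x = false then inv.insert x (inv.getD x [] ++ [kv.1]) else inv) inv)
    PySem.Dict.empty with hinv
  have hnd' : (inv.items.map Prod.fst).Nodup := by
    simpa [PySem.Dict.keys] using hnd
  -- stage 2: flattening appends the mapped items to the empty dict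
  have h2 : (inv.items.foldl (fun acc kv => acc.insert kv.1 (kv.2.headD 0))
      (PySem.Dict.empty : PySem.Dict Int Int)).items
      = inv.items.map (fun kv => (kv.1, kv.2.headD 0)) := by
    rw [PySem.Dict.items_foldl_insert_fresh _ _ _ _ (by simp) hnd']
    simp [PySem.Dict.empty]
  -- stage 3
  rw [h2, pv_stage3 c _ _ (by simp) (by simpa [List.map_map, Function.comp] using hnd')]
  unfold pvCorr at hcorr
  rw [hcorr]
  simp [List.filter_map, Function.comp_def, PySem.Dict.empty]

-- B's port equals the foldr form of the backward pass.
lemma pv_B_eq_altFold (d : List (Int × List Int)) (c : List Int) :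
    flip_dict_and_filter_alt d c = (pvAltFold c d).items := by
  unfold flip_dict_and_filter_alt pvAltFold
  simp only []
  have hfun : (fun (acc : PySem.Dict Int Int) (kv : Int × List Int) =>
      acc.items.foldl (fun h p => if h.contains p.1 = false then h.insert p.1 p.2 else h)
        (kv.2.foldl (fun h x => if x ∈ PySem.Set.ofList c then h.insert x kv.1 else h) PySem.Dict.empty))
    = (fun (acc : PySem.Dict Int Int) (kv : Int × List Int) =>
      acc.items.foldl (fun h p => if h.contains p.1 = false then h.insert p.1 p.2 else h)
        (kv.2.foldl (fun h x => if x ∈ c then h.insert x kv.1 else h) PySem.Dict.empty)) := by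
    funext acc kv
    congr 1
    congr 1
    funext h x
    by_cases hx : x ∈ c <;> simp [PySem.Set.mem_ofList, hx]
  rw [hfun, List.foldl_reverse]

-- ===== VERDICT (by name: the statement is the Claim_ definition above) =====
theorem flip_dict_and_filter_spec : Claim_equal_flip_dict_and_filter := by
  intro d c _
  show flip_dict_and_filter d c = flip_dict_and_filter_alt d c
  rw [pv_A_eq_fused, pv_B_eq_altFold, (pv_alt_items c d).1]
  have hf := pv_fused_items c d PySem.Dict.empty (by simp [PySem.Dict.keys, PySem.Dict.empty])
  unfold pvFused
  rw [hf.1]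
  simp [PySem.Dict.keys, PySem.Dict.empty]
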